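-- pv_equiv track=rewrite | github.com/Ivan-Sorochinsky/gamma_crypt | main.py | count_one_in_char
-- ===== SOURCE A (Python) =====
-- def count_one_in_char(string):
--     i=0
--     answer = []
--     for s in string:
--         for c in '{0:07b}'.format(ord(s)): # перевод в бинарный 7-разрядный код / перебор и проверка на условие
--             if c=="1":
--                 i+=1
--         answer.append(i)
--         i=0
--     return answer
-- ===== SOURCE B (Python) =====
-- def count_one_in_char(string):
--     answer = []
--     for s in string:
--         n = ord(s)
--         cnt = 0
--         while n:
--             n &= n - 1
--             cnt += 1
--         answer.append(cnt)
--     return answer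
-- ===== Notes on version B (the rewrite author's own statement) =====
-- stated objective: faster
-- what changed: B replaces A's binary-string formatting and character scan with Brian Kernighan's bit-clearing loop (n &= n-1), counting one iteration per set bit and never building a string.
import Mathlib
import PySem

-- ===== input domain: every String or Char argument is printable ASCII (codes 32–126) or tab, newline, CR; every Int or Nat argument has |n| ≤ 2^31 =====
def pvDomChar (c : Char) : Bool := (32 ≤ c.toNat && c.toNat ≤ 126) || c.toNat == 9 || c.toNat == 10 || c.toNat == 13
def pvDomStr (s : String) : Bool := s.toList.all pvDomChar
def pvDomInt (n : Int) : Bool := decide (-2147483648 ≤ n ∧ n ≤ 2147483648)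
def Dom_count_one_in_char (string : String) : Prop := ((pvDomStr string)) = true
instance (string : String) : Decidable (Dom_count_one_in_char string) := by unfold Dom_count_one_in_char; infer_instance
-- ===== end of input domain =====

-- B replaces A's binary-string formatting and per-character '1' scan with Kernighan's
-- bit-clearing loop (n &&& (n-1)), one iteration per set bit; same return value.

-- ===== PORT A =====
-- binary digits of n, most significant first (empty for 0), as '{0:b}' produces for n > 0
def pvBinDigits (n : Nat) : List Char :=
  if h : n = 0 then []
  else pvBinDigits (n / 2) ++ [if n % 2 = 1 then '1' else '0']
termination_by n
decreasing_by exact Nat.div_lt_self (Nat.pos_of_ne_zero h) (by norm_num)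

-- '{0:07b}'.format n : binary representation left-padded with '0' to width 7
def pvFormat07b (n : Nat) : List Char :=
  let d := if n = 0 then ['0'] else pvBinDigits n
  List.replicate (7 - d.length) '0' ++ d

def count_one_in_char (string : String) : List Int :=
  (string.toList.foldl
    (fun (st : Int × List Int) s =>
      let i := (pvFormat07b s.toNat).foldl (fun i c => if c = '1' then i + 1 else i) st.1
      ((0 : Int), st.2 ++ [i]))
    ((0 : Int), ([] : List Int))).2

-- ===== PORT B =====
-- while n: n &= n - 1; cnt += 1
def pvKern (n : Nat) (cnt : Int) : Int :=
  if h : n = 0 then cnt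
  else pvKern (n &&& (n - 1)) (cnt + 1)
termination_by n
decreasing_by
  calc n &&& (n - 1) ≤ n - 1 := Nat.and_le_right
    _ < n := by omega

def count_one_in_char_alt (string : String) : List Int :=
  string.toList.foldl (fun answer s => answer ++ [pvKern s.toNat 0]) []

-- ===== PRECONDITION & SPEC =====
def Spec_count_one_in_char (string : String) (out : List Int) : Prop := out = count_one_in_char_alt string
instance (string : String) (out : List Int) : Decidable (Spec_count_one_in_char string out) := by unfold Spec_count_one_in_char; infer_instance

-- ===== CLAIM (what is proved, stated in full; the proofs are below) =====
def Claim_equal_count_one_in_char : Prop := ∀ (string : String), Dom_count_one_in_char string → Spec_count_one_in_char string (count_one_in_char string)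

-- ===== LEMMAS AND PROOFS =====

-- popcount, the common value both inner computations produce
def pvPc (n : Nat) : Int :=
  if h : n = 0 then 0
  else ((n % 2 : Nat) : Int) + pvPc (n / 2)
termination_by n
decreasing_by exact Nat.div_lt_self (Nat.pos_of_ne_zero h) (by norm_num)

theorem pvPc_zero : pvPc 0 = 0 := by unfold pvPc; simp

theorem pvPc_pos (n : Nat) (h : n ≠ 0) : pvPc n = ((n % 2 : Nat) : Int) + pvPc (n / 2) := by
  conv_lhs => unfold pvPc
  simp [h]

theorem pv_and_pred_even (m : Nat) (h : 0 < m) :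
    (2 * m) &&& (2 * m - 1) = 2 * (m &&& (m - 1)) := by
  apply Nat.eq_of_testBit_eq
  intro i
  cases i with
  | zero => simp [Nat.testBit_zero]
  | succ i =>
    have h1 : (2 * m) / 2 = m := by omega
    have h2 : (2 * m - 1) / 2 = m - 1 := by omega
    have h3 : (2 * (m &&& (m - 1))) / 2 = m &&& (m - 1) := by omega
    rw [Nat.testBit_and, Nat.testBit_succ, Nat.testBit_succ, Nat.testBit_succ, h1, h2, h3,
      Nat.testBit_and]

theorem pv_and_pred_odd (m : Nat) : (2 * m + 1) &&& (2 * m) = 2 * m := by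
  apply Nat.eq_of_testBit_eq
  intro i
  cases i with
  | zero => simp [Nat.testBit_zero, Nat.mul_mod_right]
  | succ i =>
    have h1 : (2 * m + 1) / 2 = m := by omega
    have h2 : (2 * m) / 2 = m := by omega
    rw [Nat.testBit_and, Nat.testBit_succ, Nat.testBit_succ, h1, h2, Bool.and_self]

theorem pvPc_double (k : Nat) : pvPc (2 * k) = pvPc k := by
  by_cases hk : k = 0
  · simp [hk]
  · rw [pvPc_pos (2 * k) (by omega)]
    have h1 : (2 * k) % 2 = 0 := by omega
    have h2 : (2 * k) / 2 = k := by omega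
    rw [h1, h2]
    simp

theorem pvPc_and_pred (n : Nat) (h : n ≠ 0) : pvPc (n &&& (n - 1)) = pvPc n - 1 := by
  induction n using Nat.strong_induction_on with
  | _ n ih =>
    rcases Nat.even_or_odd n with he | ho
    · obtain ⟨m, hm⟩ := he
      have hm2 : n = 2 * m := by omega
      have hmpos : 0 < m := by omega
      have key : n &&& (n - 1) = 2 * (m &&& (m - 1)) := by
        rw [hm2]; exact pv_and_pred_even m hmpos
      rw [key, pvPc_double]
      by_cases hm1 : m = 1
      · subst hm1
        rw [hm2, pvPc_pos 2 (by omega)]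
        norm_num [pvPc_pos 1 (by omega), pvPc_zero]
      · have ihm := ih m (by omega) (by omega)
        have hpn : pvPc n = pvPc m := by rw [hm2, pvPc_double]
        rw [ihm, hpn]
    · obtain ⟨m, hm⟩ := ho
      have key : n &&& (n - 1) = 2 * m := by
        rw [hm]
        have h1 : 2 * m + 1 - 1 = 2 * m := by omega
        rw [h1]; exact pv_and_pred_odd m
      have hpn : pvPc n = 1 + pvPc m := by
        rw [hm, pvPc_pos (2 * m + 1) (by omega)]
        have h1 : (2 * m + 1) % 2 = 1 := by omega
        have h2 : (2 * m + 1) / 2 = m := by omega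
        rw [h1, h2]; push_cast; ring
      rw [key, pvPc_double, hpn]
      ring

theorem pvKern_eq (n : Nat) : ∀ cnt : Int, pvKern n cnt = cnt + pvPc n := by
  induction n using Nat.strong_induction_on with
  | _ n ih =>
    intro cnt
    by_cases h : n = 0
    · subst h
      unfold pvKern
      simp [pvPc_zero]
    · conv_lhs => unfold pvKern
      simp only [h, dite_false]
      have hlt : n &&& (n - 1) < n := by
        have := Nat.and_le_right (n := n) (m := n - 1)
        omega
      rw [ih _ hlt, pvPc_and_pred n h]
      ring

theorem pv_fold_count (l : List Char) : ∀ i0 : Int,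
    l.foldl (fun i c => if c = '1' then i + 1 else i) i0
      = i0 + (l.countP (fun c => c == '1') : Int) := by
  induction l with
  | nil => intro i0; simp
  | cons c l ihl =>
    intro i0
    by_cases hc : c = '1' <;>
      simp [List.countP_cons, hc, ihl] <;> ring

theorem pv_binDigits_count (n : Nat) :
    ((pvBinDigits n).countP (fun c => c == '1') : Int) = pvPc n := by
  induction n using Nat.strong_induction_on with
  | _ n ih =>
    by_cases h : n = 0
    · subst h
      unfold pvBinDigits
      simp [pvPc_zero]
    · conv_lhs => unfold pvBinDigits
      simp only [h, dite_false]
      rw [List.countP_append, pvPc_pos n h, ← ih (n / 2) (Nat.div_lt_self (by omega) (by norm_num))]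
      have hm : n % 2 = 0 ∨ n % 2 = 1 := by omega
      rcases hm with hm | hm <;> simp [hm] <;> push_cast <;> ring

theorem pv_format_count (n : Nat) :
    ((pvFormat07b n).countP (fun c => c == '1') : Int) = pvPc n := by
  unfold pvFormat07b
  by_cases h : n = 0
  · subst h
    simp [pvPc_zero, List.countP_replicate]
  · simp only [h, if_false, List.countP_append, List.countP_replicate]
    simpa using pv_binDigits_count n

theorem pv_loop (l : List Char) : ∀ acc : List Int,
    (l.foldl
      (fun (st : Int × List Int) s =>
        let i := (pvFormat07b s.toNat).foldl (fun i c => if c = '1' then i + 1 else i) st.1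
        ((0 : Int), st.2 ++ [i]))
      ((0 : Int), acc)).2
    = l.foldl (fun answer s => answer ++ [pvKern s.toNat 0]) acc := by
  induction l with
  | nil => intro acc; simp
  | cons c l ihl =>
    intro acc
    simp only [List.foldl_cons]
    rw [pv_fold_count, pvKern_eq c.toNat 0, pv_format_count]
    simpa using ihl (acc ++ [(0 : Int) + pvPc c.toNat])

theorem count_one_in_char_spec : Claim_equal_count_one_in_char := by
  intro string _
  unfold Spec_count_one_in_char count_one_in_char count_one_in_char_alt
  exact pv_loop string.toList []
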